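-- pv_equiv track=rewrite | github.com/giraldiego/encounters_overhaul | src/spawn/check_respawns_on_rest.py | pick_default_export
-- ===== SOURCE A (Python) =====
-- from typing import Iterable, List, Optional
--
-- def pick_default_export(exports: List[dict], prefixes: List[str]) -> Optional[dict]:
--     if not exports:
--         return None
--
--     if prefixes:
--         for prefix in prefixes:
--             for export in exports:
--                 name = export.get("ObjectName", "")
--                 if name.startswith(prefix):
--                     return export
--
--     for export in exports:
--         name = export.get("ObjectName", "")
--         if name.startswith("Default__"):
--             return export
--
--     return None
-- ===== SOURCE B (Python) =====
-- from typing import List, Optional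
--
--
-- def _rank(name: str, prefixes: List[str]) -> Optional[int]:
--     """Priority rank of a name: index of the first prefix it starts with;
--     len(prefixes) if it only starts with 'Default__'; None if unmatched."""
--     for i, p in enumerate(prefixes):
--         if name.startswith(p):
--             return i
--     if name.startswith("Default__"):
--         return len(prefixes)
--     return None
--
--
-- def pick_default_export(exports: List[dict], prefixes: List[str]) -> Optional[dict]:
--     best = None  # (rank, export), first export on equal rank
--     for export in exports:
--         r = _rank(export.get("ObjectName", ""), prefixes)
--         if r is None:
--             continue
--         if best is None or r < best[0]:
--             best = (r, export)
--     return None if best is None else best[1]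
-- ===== Notes on version B (the rewrite author's own statement) =====
-- stated objective: alternative
-- what changed: Replaces A's prefix-outer nested scans (each prefix rescans all exports, then a separate Default__ scan) by a single pass over exports that computes each export's priority rank (first matching prefix index, len(prefixes) for Default__, unmatched otherwise) and keeps the first export of minimum rank.
import Mathlib
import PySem

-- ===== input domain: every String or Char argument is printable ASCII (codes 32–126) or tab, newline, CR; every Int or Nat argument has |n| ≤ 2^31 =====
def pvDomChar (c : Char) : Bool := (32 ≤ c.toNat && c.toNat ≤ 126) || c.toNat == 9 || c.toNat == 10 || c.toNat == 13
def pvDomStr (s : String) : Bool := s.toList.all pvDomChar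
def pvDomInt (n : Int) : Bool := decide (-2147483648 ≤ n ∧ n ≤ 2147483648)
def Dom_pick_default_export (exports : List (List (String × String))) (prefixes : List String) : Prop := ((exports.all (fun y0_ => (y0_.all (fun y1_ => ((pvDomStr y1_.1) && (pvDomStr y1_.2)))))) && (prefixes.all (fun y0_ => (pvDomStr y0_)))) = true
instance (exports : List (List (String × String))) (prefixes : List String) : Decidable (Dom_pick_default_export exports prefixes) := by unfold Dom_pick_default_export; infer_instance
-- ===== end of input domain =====

-- B replaces A's prefixes-outer nested scans by a single pass over exports that tracks the
-- export of minimum priority rank (objective: alternative decomposition, same exact result).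

-- export.get("ObjectName", "") on the association-list dict: first matching key, else ""
def pvGetName (e : List (String × String)) : String :=
  match e.find? (fun kv => kv.1 == "ObjectName") with
  | some kv => kv.2
  | none => ""

-- ===== PORT A =====
-- inner 'for export in exports: if name.startswith(prefix): return export'
def pvAFind (exports : List (List (String × String))) (p : String) : Option (List (String × String)) :=
  match exports with
  | [] => none
  | e :: rest => if PySem.Str.startswith (pvGetName e) p then some e else pvAFind rest p

-- outer 'for prefix in prefixes' with early return
def pvAPref (prefixes : List String) (exports : List (List (String × String))) : Option (List (String × String)) :=
  match prefixes with
  | [] => none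
  | p :: ps =>
    match pvAFind exports p with
    | some e => some e
    | none => pvAPref ps exports

-- final 'for export in exports: if name.startswith("Default__"): return export'
def pvADefault (exports : List (List (String × String))) : Option (List (String × String)) :=
  match exports with
  | [] => none
  | e :: rest => if PySem.Str.startswith (pvGetName e) "Default__" then some e else pvADefault rest

def pick_default_export (exports : List (List (String × String))) (prefixes : List String) : Option (List (String × String)) :=
  if exports.isEmpty then none
  else
    match (if prefixes.isEmpty then none else pvAPref prefixes exports) with
    | some e => some e
    | none =>
      match pvADefault exports with
      | some e => some e
      | none => none

-- ===== PORT B =====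
-- _rank: index of first matching prefix; len(prefixes) for 'Default__'; none if unmatched
def pvRank (name : String) (prefixes : List String) : Option Nat :=
  match prefixes with
  | [] => if PySem.Str.startswith name "Default__" then some 0 else none
  | p :: ps =>
    if PySem.Str.startswith name p then some 0
    else (pvRank name ps).map (· + 1)

-- one iteration of B's loop over exports, updating the best (rank, export) seen so far
def pvStep (prefixes : List String) (best : Option (Nat × List (String × String)))
    (e : List (String × String)) : Option (Nat × List (String × String)) :=
  match pvRank (pvGetName e) prefixes with
  | none => best
  | some r =>
    match best with
    | none => some (r, e)
    | some b => if r < b.1 then some (r, e) else some b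

def pick_default_export_alt (exports : List (List (String × String))) (prefixes : List String) : Option (List (String × String)) :=
  match exports.foldl (pvStep prefixes) none with
  | none => none
  | some b => some b.2

-- ===== PRECONDITION & SPEC =====
def Spec_pick_default_export (exports : List (List (String × String))) (prefixes : List String) (out : Option (List (String × String))) : Prop := out = pick_default_export_alt exports prefixes
instance (exports : List (List (String × String))) (prefixes : List String) (out : Option (List (String × String))) : Decidable (Spec_pick_default_export exports prefixes out) := by unfold Spec_pick_default_export; infer_instance

-- ===== CLAIM (what is proved, stated in full; the proofs are below) =====
def Claim_equal_pick_default_export : Prop := ∀ (exports : List (List (String × String))) (prefixes : List String), Dom_pick_default_export exports prefixes → Spec_pick_default_export exports prefixes (pick_default_export exports prefixes)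

-- ===== LEMMAS AND PROOFS =====

-- proof-only: best (rank, export) of a list, earlier export wins ties
def pvBest (prefixes : List String) (l : List (List (String × String))) : Option (Nat × List (String × String)) :=
  match l with
  | [] => none
  | e :: rest =>
    match pvRank (pvGetName e) prefixes, pvBest prefixes rest with
    | none, b => b
    | some r, none => some (r, e)
    | some r, some b => if r ≤ b.1 then some (r, e) else some b

def pvSingle (prefixes : List String) (e : List (String × String)) : Option (Nat × List (String × String)) :=
  (pvRank (pvGetName e) prefixes).map (fun r => (r, e))

def pvMerge (a b : Option (Nat × List (String × String))) : Option (Nat × List (String × String)) :=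
  match a, b with
  | none, b => b
  | some a, none => some a
  | some a, some b => if b.1 < a.1 then some b else some a

theorem pvMerge_none_left (b : Option (Nat × List (String × String))) : pvMerge none b = b := rfl

theorem pvMerge_none_right (a : Option (Nat × List (String × String))) : pvMerge a none = a := by
  cases a <;> rfl

theorem pvMerge_some_some (a b : Nat × List (String × String)) :
    pvMerge (some a) (some b) = if b.1 < a.1 then some b else some a := rfl

theorem pvRank_cons (name p : String) (ps : List String) :
    pvRank name (p :: ps) =
      if PySem.Str.startswith name p then some 0 else (pvRank name ps).map (· + 1) := rfl

theorem pvStep_eq_merge (prefixes : List String) (acc : Option (Nat × List (String × String)))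
    (e : List (String × String)) : pvStep prefixes acc e = pvMerge acc (pvSingle prefixes e) := by
  unfold pvStep pvSingle
  cases pvRank (pvGetName e) prefixes with
  | none => rw [Option.map_none, pvMerge_none_right]
  | some r =>
    cases acc with
    | none => rfl
    | some a => rw [Option.map_some, pvMerge_some_some]

theorem pvBest_cons_merge (prefixes : List String) (e : List (String × String))
    (l : List (List (String × String))) :
    pvBest prefixes (e :: l) = pvMerge (pvSingle prefixes e) (pvBest prefixes l) := by
  cases hr : pvRank (pvGetName e) prefixes with
  | none =>
    have h1 : pvSingle prefixes e = none := by simp [pvSingle, hr]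
    rw [h1, pvMerge_none_left]
    show (match pvRank (pvGetName e) prefixes, pvBest prefixes l with
      | none, b => b
      | some r, none => some (r, e)
      | some r, some b => if r ≤ b.1 then some (r, e) else some b) = _
    rw [hr]
  | some r =>
    have h1 : pvSingle prefixes e = some (r, e) := by simp [pvSingle, hr]
    rw [h1]
    show (match pvRank (pvGetName e) prefixes, pvBest prefixes l with
      | none, b => b
      | some r, none => some (r, e)
      | some r, some b => if r ≤ b.1 then some (r, e) else some b) = _
    rw [hr]
    cases pvBest prefixes l with
    | none => rfl
    | some b =>
      rw [pvMerge_some_some]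
      show (if r ≤ b.1 then some (r, e) else some b) = _
      split_ifs <;> first | rfl | omega

theorem pvMerge_assoc (a b c : Option (Nat × List (String × String))) :
    pvMerge (pvMerge a b) c = pvMerge a (pvMerge b c) := by
  cases a with
  | none => rw [pvMerge_none_left, pvMerge_none_left]
  | some a =>
    cases b with
    | none => rw [pvMerge_none_right, pvMerge_none_left]
    | some b =>
      cases c with
      | none => rw [pvMerge_none_right, pvMerge_none_right]
      | some c =>
        rw [pvMerge_some_some a b, pvMerge_some_some b c]
        split_ifs <;> (try simp only [pvMerge_some_some]) <;> (try split_ifs) <;>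
          first | rfl | omega

theorem foldl_step_eq_merge_best (prefixes : List String)
    (l : List (List (String × String))) (acc : Option (Nat × List (String × String))) :
    l.foldl (pvStep prefixes) acc = pvMerge acc (pvBest prefixes l) := by
  induction l generalizing acc with
  | nil => exact (pvMerge_none_right acc).symm
  | cons e rest ih =>
    rw [List.foldl_cons, ih, pvStep_eq_merge, pvMerge_assoc, ← pvBest_cons_merge]

theorem pvBest_none (prefixes : List String) (l : List (List (String × String)))
    (h : pvBest prefixes l = none) (e : List (String × String)) (he : e ∈ l) :
    pvRank (pvGetName e) prefixes = none := by
  induction l with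
  | nil => cases he
  | cons x rest ih =>
    rw [pvBest_cons_merge] at h
    have hx : pvSingle prefixes x = none ∧ pvBest prefixes rest = none := by
      cases h1 : pvSingle prefixes x <;> cases h2 : pvBest prefixes rest <;>
        rw [h1, h2] at h
      · exact ⟨rfl, rfl⟩
      · rw [pvMerge_none_left] at h; exact absurd h (by simp)
      · rw [pvMerge_none_right] at h; exact absurd h (by simp)
      · rw [pvMerge_some_some] at h; split_ifs at h
    rcases List.mem_cons.mp he with rfl | he'
    · have := hx.1; unfold pvSingle at this
      cases hr : pvRank (pvGetName e) prefixes <;> simp_all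
    · exact ih hx.2 he'

theorem pvBest_min (prefixes : List String) (l : List (List (String × String)))
    (b : Nat × List (String × String)) (hb : pvBest prefixes l = some b)
    (e : List (String × String)) (he : e ∈ l) (r : Nat)
    (hr : pvRank (pvGetName e) prefixes = some r) : b.1 ≤ r := by
  induction l generalizing b with
  | nil => cases he
  | cons x rest ih =>
    rw [pvBest_cons_merge] at hb
    rcases List.mem_cons.mp he with rfl | he'
    · have h1 : pvSingle prefixes e = some (r, e) := by simp [pvSingle, hr]
      rw [h1] at hb
      cases h2 : pvBest prefixes rest <;> rw [h2] at hb
      · rw [pvMerge_none_right] at hb; injection hb with h'; subst h'; rfl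
      · rw [pvMerge_some_some] at hb
        split_ifs at hb with h <;> injection hb with h' <;> subst h' <;> omega
    · cases h2 : pvBest prefixes rest with
      | none =>
        exact absurd hr (by simp [pvBest_none prefixes rest h2 e he'])
      | some c =>
        have hc := ih c h2 he'
        rw [h2] at hb
        cases h1 : pvSingle prefixes x <;> rw [h1] at hb
        · rw [pvMerge_none_left] at hb; injection hb with h'; subst h'; exact hc
        · rw [pvMerge_some_some] at hb
          split_ifs at hb with h <;> injection hb with h' <;> subst h' <;> omega

-- when prefixes = [], B's best is exactly A's Default__ scan
theorem pvBest_nil (l : List (List (String × String))) :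
    (pvBest [] l).map Prod.snd = pvADefault l := by
  induction l with
  | nil => rfl
  | cons e rest ih =>
    rw [pvBest_cons_merge]
    unfold pvADefault
    split_ifs with h
    · have h1 : pvSingle [] e = some (0, e) := by
        simp [pvSingle, pvRank]; simpa using h
      rw [h1]
      cases pvBest ([] : List String) rest with
      | none => rfl
      | some b => rw [pvMerge_some_some, if_neg (by omega)]; rfl
    · have h1 : pvSingle [] e = none := by
        simp [pvSingle, pvRank]; simpa using h
      rw [h1, pvMerge_none_left]
      exact ih

-- A's inner scan characterised
theorem pvAFind_some (l : List (List (String × String))) (p : String)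
    (f : List (String × String)) (h : pvAFind l p = some f) :
    f ∈ l ∧ PySem.Str.startswith (pvGetName f) p = true := by
  induction l with
  | nil =>
    have h' : (none : Option (List (String × String))) = some f := h
    cases h'
  | cons y t ih =>
    unfold pvAFind at h
    split_ifs at h with hy
    · injection h with h'; subst h'; exact ⟨List.mem_cons_self .., hy⟩
    · obtain ⟨h1, h2⟩ := ih h
      exact ⟨List.mem_cons_of_mem _ h1, h2⟩

theorem pvAFind_none (l : List (List (String × String))) (p : String)
    (h : pvAFind l p = none) :
    ∀ x ∈ l, PySem.Str.startswith (pvGetName x) p = false := by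
  induction l with
  | nil => intro x hx; cases hx
  | cons y t ih =>
    unfold pvAFind at h
    split_ifs at h with hy
    intro x hx
    rcases List.mem_cons.mp hx with rfl | hx'
    · cases hb : PySem.Str.startswith (pvGetName x) p <;> simp_all
    · exact ih h x hx'

-- no element of l matches p → ranks for (p :: ps) are the ps-ranks shifted by one
theorem pvBest_shift (p : String) (ps : List String) (l : List (List (String × String)))
    (hl : ∀ e ∈ l, PySem.Str.startswith (pvGetName e) p = false) :
    pvBest (p :: ps) l = (pvBest ps l).map (fun b => (b.1 + 1, b.2)) := by
  induction l with
  | nil => rfl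
  | cons e rest ih =>
    have he := hl e (List.mem_cons_self ..)
    have hec : PySem.Chars.startswith (pvGetName e).toList p.toList = false := by simpa using he
    have ih' := ih (fun x hx => hl x (List.mem_cons_of_mem _ hx))
    rw [pvBest_cons_merge, pvBest_cons_merge, ih']
    cases hr : pvRank (pvGetName e) ps with
    | none =>
      have h1 : pvSingle (p :: ps) e = none := by simp [pvSingle, pvRank_cons, hec, hr]
      have h2 : pvSingle ps e = none := by simp [pvSingle, hr]
      rw [h1, h2, pvMerge_none_left, pvMerge_none_left]
    | some r =>
      have h1 : pvSingle (p :: ps) e = some (r + 1, e) := by simp [pvSingle, pvRank_cons, hec, hr]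
      have h2 : pvSingle ps e = some (r, e) := by simp [pvSingle, hr]
      rw [h1, h2]
      cases pvBest ps rest with
      | none => rw [Option.map_none, pvMerge_none_right, pvMerge_none_right, Option.map_some]
      | some b =>
        rw [Option.map_some, pvMerge_some_some, pvMerge_some_some]
        split_ifs <;> first | (exfalso; omega) | (rw [Option.map_some])

-- peeling one prefix off B's best reproduces A's scan for that prefix
theorem pvBest_cons (p : String) (ps : List String) (l : List (List (String × String))) :
    (pvBest (p :: ps) l).map Prod.snd =
      match pvAFind l p with
      | some e => some e
      | none => (pvBest ps l).map Prod.snd := by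
  induction l with
  | nil => rfl
  | cons e rest ih =>
    by_cases hm : PySem.Str.startswith (pvGetName e) p = true
    · -- e matches p: rank 0, e wins every tie, and A's scan returns e first
      have hmc : PySem.Chars.startswith (pvGetName e).toList p.toList = true := by simpa using hm
      have hA : pvAFind (e :: rest) p = some e := by
        show (if PySem.Str.startswith (pvGetName e) p = true then some e else pvAFind rest p)
          = some e
        rw [hm, if_pos rfl]
      have h1 : pvSingle (p :: ps) e = some (0, e) := by simp [pvSingle, pvRank_cons, hmc]
      rw [pvBest_cons_merge, hA, h1]
      cases pvBest (p :: ps) rest with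
      | none => rfl
      | some b => rw [pvMerge_some_some, if_neg (by omega)]; rfl
    · have hm' : PySem.Str.startswith (pvGetName e) p = false := by
        cases h : PySem.Str.startswith (pvGetName e) p <;> simp_all
      have hmc : PySem.Chars.startswith (pvGetName e).toList p.toList = false := by simpa using hm'
      have hA : pvAFind (e :: rest) p = pvAFind rest p := by
        show (if PySem.Str.startswith (pvGetName e) p = true then some e else pvAFind rest p) = _
        rw [hm']; simp
      cases hf : pvAFind rest p with
      | some f =>
        -- f ∈ rest matches p, hence has rank 0 under (p :: ps); it dominates
        have hfmem := pvAFind_some rest p f hf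
        have hB : (pvBest (p :: ps) rest).map Prod.snd = some f := by rw [ih, hf]
        obtain ⟨b, hb, hbf⟩ : ∃ b, pvBest (p :: ps) rest = some b ∧ b.2 = f := by
          cases h : pvBest (p :: ps) rest <;> rw [h] at hB <;> simp_all
        have hrf : pvRank (pvGetName f) (p :: ps) = some 0 := by
          rw [pvRank_cons, hfmem.2, if_pos rfl]
        have hb0 : b.1 = 0 := by
          have := pvBest_min (p :: ps) rest b hb f hfmem.1 0 hrf
          omega
        rw [pvBest_cons_merge, hA, hf, hb]
        cases hr : pvRank (pvGetName e) ps with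
        | none =>
          have h1 : pvSingle (p :: ps) e = none := by simp [pvSingle, pvRank_cons, hmc, hr]
          rw [h1, pvMerge_none_left, Option.map_some, hbf]
        | some r =>
          have h1 : pvSingle (p :: ps) e = some (r + 1, e) := by
            simp [pvSingle, pvRank_cons, hmc, hr]
          rw [h1, pvMerge_some_some, if_pos (by omega), Option.map_some, hbf]
      | none =>
        -- nothing in e :: rest matches p: shift the whole best computation
        have hnone : ∀ x ∈ e :: rest, PySem.Str.startswith (pvGetName x) p = false := by
          intro x hx
          rcases List.mem_cons.mp hx with rfl | hx'
          · exact hm'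
          · exact pvAFind_none rest p hf x hx'
        rw [pvBest_shift p ps _ hnone, hA, hf]
        cases pvBest ps (e :: rest) <;> rfl

-- A's whole body, fused (the exports-nonempty and prefixes-nonempty guards are redundant)
def pvACore (prefixes : List String) (exports : List (List (String × String))) : Option (List (String × String)) :=
  match prefixes with
  | [] => pvADefault exports
  | p :: ps =>
    match pvAFind exports p with
    | some e => some e
    | none => pvACore ps exports

theorem pvACore_eq_best (prefixes : List String) (exports : List (List (String × String))) :
    pvACore prefixes exports = (pvBest prefixes exports).map Prod.snd := by
  induction prefixes with
  | nil => exact (pvBest_nil exports).symm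
  | cons p ps ih =>
    rw [pvACore, pvBest_cons, ih]

theorem pvAPref_fallback (prefixes : List String) (exports : List (List (String × String))) :
    (match pvAPref prefixes exports with
     | some e => some e
     | none => match pvADefault exports with | some e => some e | none => none)
      = pvACore prefixes exports := by
  induction prefixes with
  | nil =>
    show (match pvADefault exports with | some e => some e | none => none) = pvADefault exports
    cases pvADefault exports <;> rfl
  | cons p ps ih =>
    show (match (match pvAFind exports p with | some e => some e | none => pvAPref ps exports) with
          | some e => some e
          | none => match pvADefault exports with | some e => some e | none => none) = _
    unfold pvACore
    cases pvAFind exports p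
    · exact ih
    · rfl

theorem pvACore_nil_exports (prefixes : List String) :
    pvACore prefixes ([] : List (List (String × String))) = none := by
  induction prefixes with
  | nil => rfl
  | cons p ps ih => simpa [pvACore, pvAFind] using ih

-- ===== VERDICT (by name: the statement is the Claim_ definition above) =====
theorem pick_default_export_spec : Claim_equal_pick_default_export := by
  intro exports prefixes _
  unfold Spec_pick_default_export pick_default_export pick_default_export_alt
  rw [foldl_step_eq_merge_best]
  have hB : (match pvMerge none (pvBest prefixes exports) with
      | none => none
      | some b => some b.2) = (pvBest prefixes exports).map Prod.snd := by
    cases pvBest prefixes exports <;> rfl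
  rw [hB, ← pvACore_eq_best]
  by_cases hex : exports = []
  · subst hex
    simp [pvACore_nil_exports]
  · rw [if_neg (by simpa using hex)]
    by_cases hp : prefixes = []
    · subst hp
      simp only [List.isEmpty_nil, if_true]
      show (match (none : Option (List (String × String))) with
            | some e => some e
            | none => match pvADefault exports with | some e => some e | none => none)
          = pvACore [] exports
      unfold pvACore
      cases pvADefault exports <;> rfl
    · rw [if_neg (by simpa using hp), pvAPref_fallback]
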